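-- pv_equiv track=rewrite | github.com/daniel-reich/ubiquitous-fiesta | Nh8xqtHAzoiaEyKrv_2.py | correct_sentences
-- ===== SOURCE A (Python) =====
-- def correct_sentences(s):
--     words=s.split()
--     for i in range(1,len(words)):
--         if words[i].istitle():
--             words[i-1]=words[i-1]+'.'
--     r=words[0].capitalize()
--     for i in range(1,len(words)):
--         r=r+' '+words[i]
--     r=r+'.'
--     return r
-- ===== SOURCE B (Python) =====
-- def correct_sentences(s):
--     words = s.split()
--     cur = [words[0].capitalize()]
--     segs = []
--     for w in words[1:]:
--         if w.istitle():
--             segs.append(' '.join(cur))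
--             cur = [w]
--         else:
--             cur.append(w)
--     segs.append(' '.join(cur))
--     return '. '.join(segs) + '.'
-- ===== Notes on version B (the rewrite author's own statement) =====
-- stated objective: alternative
-- what changed: Instead of A's two index passes that first mutate the word list (appending a period to the word before each title-cased word) and then concatenate by accumulated indexing, B makes one pass that partitions the words into sentence segments (a new segment starts at each title-cased word), joins each segment with spaces and the segments with a period-plus-space separator, appending a final period.
import Mathlib
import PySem

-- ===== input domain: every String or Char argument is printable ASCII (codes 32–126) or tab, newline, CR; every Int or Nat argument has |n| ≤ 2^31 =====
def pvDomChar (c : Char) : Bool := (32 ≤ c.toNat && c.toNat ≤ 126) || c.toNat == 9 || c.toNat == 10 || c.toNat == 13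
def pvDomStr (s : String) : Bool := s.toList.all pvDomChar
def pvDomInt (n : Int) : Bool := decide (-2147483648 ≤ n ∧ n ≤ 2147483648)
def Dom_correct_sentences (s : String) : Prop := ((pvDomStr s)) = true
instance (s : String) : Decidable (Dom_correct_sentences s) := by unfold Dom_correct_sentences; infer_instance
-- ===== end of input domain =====

-- B replaces A's two index passes (mutate the word list in place, then concatenate by index) with a
-- single segment-building pass joined at the end; same O(n) cost, a different decomposition.

-- Shared ports of the Python built-ins str.istitle / str.capitalize (exact on the ASCII domain
-- Dom_correct_sentences admits): CPython's istitle state machine over cased/uncased characters.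
def pyIstitleGo : List Char → Bool → Bool → Bool
  | [], _, cased => cased
  | c :: rest, prev, cased =>
    if 'A' ≤ c ∧ c ≤ 'Z' then (if prev then false else pyIstitleGo rest true true)
    else if 'a' ≤ c ∧ c ≤ 'z' then (if prev then pyIstitleGo rest true true else false)
    else pyIstitleGo rest false cased

def pyIstitle (w : List Char) : Bool := pyIstitleGo w false false

-- str.capitalize: first char uppercased, the rest lowercased (ASCII-exact).
def pyCapitalize : List Char → List Char
  | [] => []
  | c :: rest => PySem.Chars.upper [c] ++ PySem.Chars.lower rest

-- ===== PORT A =====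
def correct_sentences (s : String) : String :=
  let words : List (List Char) := PySem.Chars.split₀ s.toList
  -- for i in range(1, len(words)): if words[i].istitle(): words[i-1] = words[i-1] + '.'
  let words := (PySem.List.pyRange 1 (words.length : Int) 1).foldl
    (fun ws i =>
      if pyIstitle (PySem.List.pyGetD ws i []) then
        PySem.List.pySetD ws (i - 1) (PySem.List.pyGetD ws (i - 1) [] ++ ['.'])
      else ws) words
  -- r = words[0].capitalize()  (words[0] raises IndexError on empty input: excluded by Pre_)
  let r := pyCapitalize (PySem.List.pyGetD words 0 [])
  -- for i in range(1, len(words)): r = r + ' ' + words[i]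
  let r := (PySem.List.pyRange 1 (words.length : Int) 1).foldl
    (fun r i => r ++ [' '] ++ PySem.List.pyGetD words i []) r
  String.ofList (r ++ ['.'])

-- ===== PORT B =====
def correct_sentences_alt (s : String) : String :=
  let words : List (List Char) := PySem.Chars.split₀ s.toList
  -- cur = [words[0].capitalize()]; segs = []
  -- for w in words[1:]: if w.istitle(): segs.append(' '.join(cur)); cur = [w] else: cur.append(w)
  let cur : List (List Char) := [pyCapitalize (PySem.List.pyGetD words 0 [])]
  let p := (PySem.List.slice words (some 1) none).foldl
    (fun (p : List (List Char) × List (List Char)) w =>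
      if pyIstitle w then (p.1 ++ [PySem.Chars.join [' '] p.2], [w])
      else (p.1, p.2 ++ [w]))
    ([], cur)
  -- segs.append(' '.join(cur)); return '. '.join(segs) + '.'
  let segs := p.1 ++ [PySem.Chars.join [' '] p.2]
  String.ofList (PySem.Chars.join ['.', ' '] segs ++ ['.'])

-- ===== PRECONDITION & SPEC =====
-- Pre_ excludes exactly the whitespace-only inputs (no words), on which the Python A raises
-- IndexError at words[0].
def Pre_correct_sentences (s : String) : Prop := PySem.Chars.split₀ s.toList ≠ []
instance (s : String) : Decidable (Pre_correct_sentences s) := by unfold Pre_correct_sentences; infer_instance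
def pvWitness_correct_sentences : String := "hello world"

def Spec_correct_sentences (s : String) (out : String) : Prop := out = correct_sentences_alt s
instance (s : String) (out : String) : Decidable (Spec_correct_sentences s out) := by unfold Spec_correct_sentences; infer_instance

-- ===== CLAIM (what is proved, stated in full; the proofs are below) =====
def Claim_equal_correct_sentences : Prop := ∀ (s : String), Dom_correct_sentences s → Pre_correct_sentences s → Spec_correct_sentences s (correct_sentences s)

-- ===== LEMMAS AND PROOFS =====

-- A's marked word list: '.' appended to each word that is followed by a title-cased word.
def markA : List Char → List (List Char) → List (List Char)
  | x, [] => [x]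
  | x, y :: t => (if pyIstitle y then x ++ ['.'] else x) :: markA y t

-- " ".join of the marked words — the common normal form both programs reach (first word untouched).
def markFlat : List Char → List (List Char) → List Char
  | x, [] => x
  | x, y :: t => (if pyIstitle y then x ++ ['.'] else x) ++ ' ' :: markFlat y t

-- the prefix a join contributes before one further element
def jpfx (sep : List Char) (l : List (List Char)) : List Char :=
  if l = [] then [] else PySem.Chars.join sep l ++ sep

lemma getD_append_len (pre : List (List Char)) (z : List Char) (zs : List (List Char)) :
    (pre ++ z :: zs).getD pre.length [] = z := by
  simp [List.getD]

lemma set_append_len (pre : List (List Char)) (z v : List Char) (zs : List (List Char)) :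
    (pre ++ z :: zs).set pre.length v = pre ++ v :: zs := by
  rw [List.set_append_right _ _ (le_refl _)]; simp

-- A's first loop computes markA (step i reads index i, writes index i-1; P is the settled prefix).
lemma markLoop (T : List (List Char)) : ∀ (P : List (List Char)) (x : List Char),
    (PySem.List.pyRange ((P.length + 1 : Nat) : Int) ((P.length + 1 + T.length : Nat) : Int) 1).foldl
      (fun ws i =>
        if pyIstitle (PySem.List.pyGetD ws i []) then
          PySem.List.pySetD ws (i - 1) (PySem.List.pyGetD ws (i - 1) [] ++ ['.'])
        else ws) (P ++ x :: T)
    = P ++ markA x T := by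
  induction T with
  | nil => intro P x; simp [PySem.List.pyRange_one_eq_nil, markA]
  | cons y T ih =>
    intro P x
    rw [PySem.List.pyRange_one_cons (by exact_mod_cast Nat.lt_add_of_pos_right (Nat.succ_pos _))]
    rw [List.foldl_cons]
    have hidx : ((P.length + 1 : Nat) : Int) - 1 = ((P.length : Nat) : Int) := by push_cast; ring
    have hget1 : PySem.List.pyGetD (P ++ x :: y :: T) ((P.length + 1 : Nat) : Int) [] = y := by
      rw [PySem.List.pyGetD_natCast]
      have : P ++ x :: y :: T = (P ++ [x]) ++ y :: T := by simp
      rw [this, show P.length + 1 = (P ++ [x]).length by simp, getD_append_len]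
    have hget0 : PySem.List.pyGetD (P ++ x :: y :: T) (((P.length + 1 : Nat) : Int) - 1) [] = x := by
      rw [hidx, PySem.List.pyGetD_natCast, getD_append_len]
    have hrange : ∀ x' : List Char,
        (PySem.List.pyRange (((P.length + 1 : Nat) : Int) + 1) ((P.length + 1 + (y :: T).length : Nat) : Int) 1)
        = (PySem.List.pyRange (((P ++ [x']).length + 1 : Nat) : Int) (((P ++ [x']).length + 1 + T.length : Nat) : Int) 1) := by
      intro x'; congr 1 <;> simp <;> push_cast <;> ring
    by_cases h : pyIstitle y
    · rw [hget1, if_pos h, hget0, hidx, PySem.List.pySetD_natCast, set_append_len]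
      rw [show P ++ (x ++ ['.']) :: y :: T = (P ++ [x ++ ['.']]) ++ y :: T by simp,
          hrange (x ++ ['.']), ih]
      simp [markA, h]
    · rw [hget1, if_neg h]
      rw [show P ++ x :: y :: T = (P ++ [x]) ++ y :: T by simp, hrange x, ih]
      simp [markA, h]

lemma flat_markA (t : List (List Char)) : ∀ y,
    (markA y t).flatMap (fun w => ' ' :: w) = ' ' :: markFlat y t := by
  induction t with
  | nil => intro y; simp [markA, markFlat]
  | cons z t ih => intro y; simp [markA, markFlat, ih]

lemma lower_dot (x : List Char) :
    PySem.Chars.lower (x ++ ['.']) = PySem.Chars.lower x ++ ['.'] := by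
  simp [PySem.Chars.lower]; decide

lemma cap_append_dot (x : List Char) :
    pyCapitalize (x ++ ['.']) = pyCapitalize x ++ ['.'] := by
  cases x with
  | nil => simp [pyCapitalize]; decide
  | cons c rest => simp [pyCapitalize, lower_dot]

-- capitalized head + flattened tail of the marked list = markFlat of the capitalized first word
lemma Acore_eq (R : List (List Char)) (x : List Char) :
    pyCapitalize ((markA x R).headD []) ++ ((markA x R).drop 1).flatMap (fun w => ' ' :: w)
    = markFlat (pyCapitalize x) R := by
  cases R with
  | nil => simp [markA, markFlat]
  | cons y t =>
    show pyCapitalize ((((if pyIstitle y then x ++ ['.'] else x) :: markA y t) : List (List Char)).headD [])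
        ++ (((if pyIstitle y then x ++ ['.'] else x) :: markA y t).drop 1).flatMap (fun w => ' ' :: w) = _
    rw [List.headD_cons, List.drop_one, List.tail_cons, flat_markA]
    show pyCapitalize (if pyIstitle y then x ++ ['.'] else x) ++ (' ' :: markFlat y t) = markFlat (pyCapitalize x) (y :: t)
    rw [markFlat]
    split_ifs with h
    · rw [cap_append_dot]
    · rfl

lemma join_append_singleton (sep : List Char) (l : List (List Char)) (z : List Char) :
    PySem.Chars.join sep (l ++ [z]) = jpfx sep l ++ z := by
  induction l with
  | nil => simp [jpfx, PySem.Chars.join_singleton]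
  | cons a l ih =>
    cases l with
    | nil => simp [jpfx, PySem.Chars.join_singleton, PySem.Chars.join_cons_cons]
    | cons b t =>
      show PySem.Chars.join sep (a :: (b :: (t ++ [z]))) = _
      rw [PySem.Chars.join_cons_cons, show b :: (t ++ [z]) = (b :: t) ++ [z] from rfl, ih]
      simp [jpfx, PySem.Chars.join_cons_cons]

lemma jpfx_append_singleton (sep : List Char) (l : List (List Char)) (z : List Char) :
    jpfx sep (l ++ [z]) = jpfx sep l ++ z ++ sep := by
  simp [jpfx, join_append_singleton]

-- B's fold: closed segments (jpfx-joined) plus the open segment cur ++ [x]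
lemma Bfold (R : List (List Char)) : ∀ (segs cur : List (List Char)) (x : List Char),
    PySem.Chars.join ['.', ' ']
      ((R.foldl (fun (p : List (List Char) × List (List Char)) w =>
          if pyIstitle w then (p.1 ++ [PySem.Chars.join [' '] p.2], [w])
          else (p.1, p.2 ++ [w])) (segs, cur ++ [x])).1
        ++ [PySem.Chars.join [' ']
             (R.foldl (fun (p : List (List Char) × List (List Char)) w =>
                if pyIstitle w then (p.1 ++ [PySem.Chars.join [' '] p.2], [w])
                else (p.1, p.2 ++ [w])) (segs, cur ++ [x])).2])
    = jpfx ['.', ' '] segs ++ jpfx [' '] cur ++ markFlat x R := by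
  induction R with
  | nil =>
    intro segs cur x
    simp only [List.foldl_nil, markFlat]
    rw [join_append_singleton, join_append_singleton]
    simp
  | cons w R ih =>
    intro segs cur x
    simp only [List.foldl_cons]
    by_cases h : pyIstitle w
    · rw [if_pos h]
      have h1 := ih (segs ++ [PySem.Chars.join [' '] (cur ++ [x])]) [] w
      simp only [List.nil_append] at h1
      rw [h1, jpfx_append_singleton, join_append_singleton, markFlat, if_pos h]
      simp [jpfx]
    · rw [if_neg h]
      have h1 := ih segs (cur ++ [x]) w
      rw [h1, jpfx_append_singleton, markFlat, if_neg h]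
      simp

lemma getD_zero_eq_headD (l : List (List Char)) : l.getD 0 [] = l.headD [] := by
  cases l <;> simp

-- ===== VERDICT (by name: the statement is the Claim_ definition above) =====
theorem correct_sentences_spec : Claim_equal_correct_sentences := by
  intro s _ hpre
  unfold Spec_correct_sentences correct_sentences correct_sentences_alt
  obtain ⟨x, R, hw⟩ := List.exists_cons_of_ne_nil hpre
  simp only [hw]
  -- A's first loop is markA
  have hM : (PySem.List.pyRange 1 ((x :: R).length : Int) 1).foldl
      (fun ws i =>
        if pyIstitle (PySem.List.pyGetD ws i []) then
          PySem.List.pySetD ws (i - 1) (PySem.List.pyGetD ws (i - 1) [] ++ ['.'])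
        else ws) (x :: R) = markA x R := by
    have h := markLoop R [] x
    rw [show ((x :: R).length : Int) = 1 + (R.length : Int) by push_cast [List.length_cons]; ring]
    simpa using h
  rw [hM]
  -- A's second loop is an append-flatMap over the tail of the marked list
  rw [PySem.List.foldl_pyRange_pyGetD' (markA x R) []
        (fun r w => r ++ [' '] ++ w) _ (by norm_num : (0:Int) ≤ 1)]
  simp only [List.append_assoc, List.singleton_append, Int.toNat_one, List.drop_one]
  rw [PySem.List.foldl_append_eq_flatMap (fun w => ' ' :: w)]
  -- B's slice is the tail, B's fold is Bfold
  rw [PySem.List.slice_from_one, List.tail_cons, PySem.List.pyGetD_zero_cons]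
  rw [show ([pyCapitalize x] : List (List Char)) = [] ++ [pyCapitalize x] from rfl, Bfold]
  rw [PySem.List.pyGetD_zero, getD_zero_eq_headD, ← List.drop_one, Acore_eq]
  simp [jpfx]
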